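-- pv_equiv track=rewrite | github.com/inchinet/blogspot-to-wordpress | wp_utils.py | clean_wp_url
-- ===== SOURCE A (Python) =====
-- def clean_wp_url(url):
--     """
--     Cleans the WordPress URL to get the base URL.
--     Removes trailing slashes, 'wp-json', 'index.php', and query parameters.
--     """
--     if not url:
--         return ""
--     url = url.strip()
--
--     # Remove common API paths and suffixes
--     for suffix in ['/wp-json/wp/v2/posts', '/wp-json/wp/v2/media', '/wp-json', '/index.php']:
--         if suffix in url:
--             url = url.split(suffix)[0]
--
--     # Remove query parameters
--     if '?' in url:
--         url = url.split('?')[0]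
--
--     # Remove trailing slash(es)
--     url = url.rstrip('/')
--     return url
-- ===== SOURCE B (Python) =====
-- def clean_wp_url(url):
--     """
--     Cleans the WordPress URL to get the base URL.
--     Computes the earliest cut position over all markers in one pass,
--     then slices once and strips trailing slashes.
--     """
--     if not url:
--         return ""
--     url = url.strip()
--     cut = len(url)
--     for marker in ['/wp-json/wp/v2/posts', '/wp-json/wp/v2/media', '/wp-json', '/index.php', '?']:
--         i = url.find(marker)
--         if i != -1 and i < cut:
--             cut = i
--     return url[:cut].rstrip('/')
-- ===== Notes on version B (the rewrite author's own statement) =====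
-- stated objective: alternative
-- what changed: Instead of sequentially truncating the URL with one split-and-reassign per marker, B scans the markers once over the unchanged stripped URL, maintains the minimum find-index as a single cut position, and slices once before stripping trailing slashes.
import Mathlib
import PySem

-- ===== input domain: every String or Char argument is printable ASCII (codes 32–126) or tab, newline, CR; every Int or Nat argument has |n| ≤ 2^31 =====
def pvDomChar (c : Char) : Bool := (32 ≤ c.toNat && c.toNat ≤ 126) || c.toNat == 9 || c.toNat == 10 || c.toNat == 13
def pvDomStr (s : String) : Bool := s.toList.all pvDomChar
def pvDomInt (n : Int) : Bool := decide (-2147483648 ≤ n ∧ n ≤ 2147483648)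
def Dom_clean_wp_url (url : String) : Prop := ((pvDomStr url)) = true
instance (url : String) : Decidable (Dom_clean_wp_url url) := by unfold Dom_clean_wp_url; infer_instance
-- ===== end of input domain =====

-- B replaces A's sequential split-and-reassign truncation by a single minimum-cut-index scan and one slice; objective: alternative decomposition (same cost).

-- hand port of Python's s.rstrip('/') (fixed chars argument), used by both Pythons:
-- drop trailing '/' characters; exact: rstrip removes exactly the maximal trailing run of '/'
def pyRstripSlash (s : String) : String :=
  String.ofList ((s.toList.reverse.dropWhile (fun c => c == '/')).reverse)

-- ===== PORT A =====
def clean_wp_url (url : String) : String :=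
  if url == "" then ""
  else
    let u1 := PySem.Str.strip url
    let u2 := ["/wp-json/wp/v2/posts", "/wp-json/wp/v2/media", "/wp-json", "/index.php"].foldl
      (fun u sfx => if PySem.Str.isIn sfx u then ((PySem.Str.split? u sfx).getD []).headD "" else u) u1
    let u3 := if PySem.Str.isIn "?" u2 then ((PySem.Str.split? u2 "?").getD []).headD "" else u2
    pyRstripSlash u3

-- ===== PORT B =====
def clean_wp_url_alt (url : String) : String :=
  if url == "" then ""
  else
    let u := PySem.Str.strip url
    let cut := ["/wp-json/wp/v2/posts", "/wp-json/wp/v2/media", "/wp-json", "/index.php", "?"].foldl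
      (fun c m => let i := PySem.Str.find u m; if i ≠ -1 ∧ i < c then i else c) (PySem.Str.len u)
    pyRstripSlash (PySem.Str.slice u none (some cut))

-- ===== PRECONDITION & SPEC =====
def Spec_clean_wp_url (url : String) (out : String) : Prop := out = clean_wp_url_alt url
instance (url : String) (out : String) : Decidable (Spec_clean_wp_url url out) := by unfold Spec_clean_wp_url; infer_instance

-- ===== CLAIM (what is proved, stated in full; the proofs are below) =====
def Claim_equal_clean_wp_url : Prop := ∀ (url : String), Dom_clean_wp_url url → Spec_clean_wp_url url (clean_wp_url url)

-- ===== LEMMAS AND PROOFS =====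

-- the five markers of the two programs, as char lists (A's four suffixes plus '?')
def pvMks : List (List Char) :=
  ["/wp-json/wp/v2/posts".toList, "/wp-json/wp/v2/media".toList, "/wp-json".toList,
   "/index.php".toList, "?".toList]

-- one truncation step of A, at the char-list level
def pvStepA (v m : List Char) : List Char :=
  if PySem.Chars.isIn m v then (PySem.Chars.splitOn v m).headD [] else v

-- one cut-update step of B, at the char-list level
def pvStepCut (cs : List Char) (c : Int) (m : List Char) : Int :=
  let i := PySem.Chars.find cs m
  if i ≠ -1 ∧ i < c then i else c

-- everything before the first occurrence of sep (the whole list if sep does not occur)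
def pvTakeFirst (sep : List Char) : List Char → List Char
  | [] => []
  | c :: rest => if sep.isPrefixOf (c :: rest) then [] else c :: pvTakeFirst sep rest

-- invariant of B's fold: the cut is in range and (unless untouched) starts an occurrence of a marker
def pvInv (cs : List Char) (c : Int) : Prop :=
  0 ≤ c ∧ c ≤ (cs.length : Int) ∧ (c = (cs.length : Int) ∨ ∃ m ∈ pvMks, m <+: cs.drop c.toNat)

theorem pvMks_ne_nil : ∀ m ∈ pvMks, m ≠ [] := by decide

theorem pv_go_zero (sep l cur : List Char) (acc : List (List Char)) :
    PySem.Chars.splitOn.go sep 0 l cur acc = ((cur.reverse ++ l) :: acc).reverse := by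
  rw [PySem.Chars.splitOn.go]

theorem pv_go_nil (sep cur : List Char) (acc : List (List Char)) (fuel : Nat) :
    PySem.Chars.splitOn.go sep (fuel+1) [] cur acc = (cur.reverse :: acc).reverse := by
  rw [PySem.Chars.splitOn.go]; simp

theorem pv_go_pos (sep cur : List Char) (acc : List (List Char)) (fuel : Nat) (c : Char) (rest : List Char)
    (h : sep.isPrefixOf (c :: rest) = true) :
    PySem.Chars.splitOn.go sep (fuel+1) (c :: rest) cur acc
      = PySem.Chars.splitOn.go sep fuel (List.drop sep.length (c :: rest)) [] (cur.reverse :: acc) := by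
  rw [PySem.Chars.splitOn.go]; simp [h]

theorem pv_go_neg (sep cur : List Char) (acc : List (List Char)) (fuel : Nat) (c : Char) (rest : List Char)
    (h : sep.isPrefixOf (c :: rest) = false) :
    PySem.Chars.splitOn.go sep (fuel+1) (c :: rest) cur acc
      = PySem.Chars.splitOn.go sep fuel rest (c :: cur) acc := by
  rw [PySem.Chars.splitOn.go]; simp [h]

theorem pv_go_acc (sep : List Char) (fuel : Nat) : ∀ (l cur : List Char) (acc : List (List Char)),
    PySem.Chars.splitOn.go sep fuel l cur acc = acc.reverse ++ PySem.Chars.splitOn.go sep fuel l cur [] := by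
  induction fuel with
  | zero => intro l cur acc; rw [pv_go_zero, pv_go_zero]; simp
  | succ fuel ih =>
    intro l cur acc
    cases l with
    | nil => rw [pv_go_nil, pv_go_nil]; simp
    | cons c rest =>
      cases h : sep.isPrefixOf (c :: rest) with
      | true =>
        rw [pv_go_pos _ _ _ _ _ _ h, pv_go_pos _ _ _ _ _ _ h, ih, ih _ _ ([cur.reverse])]
        simp
      | false => rw [pv_go_neg _ _ _ _ _ _ h, pv_go_neg _ _ _ _ _ _ h, ih, ih _ (c :: cur) []]

theorem pv_go_head (sep : List Char) (fuel : Nat) : ∀ (l cur : List Char), l.length < fuel →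
    (PySem.Chars.splitOn.go sep fuel l cur []).headD [] = cur.reverse ++ pvTakeFirst sep l := by
  induction fuel with
  | zero => omega
  | succ fuel ih =>
    intro l cur hlen
    cases l with
    | nil => rw [pv_go_nil]; simp [pvTakeFirst]
    | cons c rest =>
      cases h : sep.isPrefixOf (c :: rest) with
      | true =>
        rw [pv_go_pos _ _ _ _ _ _ h, pv_go_acc]
        simp [pvTakeFirst, h]
      | false =>
        rw [pv_go_neg _ _ _ _ _ _ h, ih rest (c :: cur) (by simpa using Nat.lt_of_succ_lt_succ hlen)]
        simp [pvTakeFirst, h]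

theorem pv_splitOn_headD (l sep : List Char) :
    (PySem.Chars.splitOn l sep).headD [] = pvTakeFirst sep l := by
  show (PySem.Chars.splitOn.go sep (l.length + 1) l [] []).headD [] = _
  rw [pv_go_head sep (l.length + 1) l [] (by omega)]
  simp

theorem pv_takeFirst_at (sep : List Char) (hsep : sep ≠ []) : ∀ (l : List Char) (j : Nat),
    sep <+: l.drop j → (∀ i, i < j → ¬ sep <+: l.drop i) → pvTakeFirst sep l = l.take j := by
  intro l
  induction l with
  | nil =>
    intro j hj _
    simp at hj
    exact absurd hj hsep
  | cons c rest ih =>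
    intro j hj hmin
    cases j with
    | zero =>
      have : sep.isPrefixOf (c :: rest) = true := (List.isPrefixOf_iff_prefix).2 (by simpa using hj)
      rw [pvTakeFirst, this]
      simp
    | succ j =>
      have h0 : sep.isPrefixOf (c :: rest) = false := by
        rw [Bool.eq_false_iff]
        intro hp
        exact hmin 0 (by omega) (by simpa using (List.isPrefixOf_iff_prefix).1 hp)
      rw [pvTakeFirst, h0]
      simp only [Bool.false_eq_true, if_false, List.take_succ_cons]
      rw [ih j (by simpa using hj) (fun i hi => by simpa using hmin (i+1) (by omega))]

theorem pv_prefix_take_drop (m cs : List Char) (hm : m ≠ []) (c j : Nat) :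
    m <+: (cs.take c).drop j ↔ m <+: cs.drop j ∧ j + m.length ≤ c := by
  have hlen : 0 < m.length := List.length_pos_iff.2 hm
  rw [List.drop_take, List.prefix_take_iff]
  constructor
  · rintro ⟨h1, h2⟩
    exact ⟨h1, by omega⟩
  · rintro ⟨h1, h2⟩
    exact ⟨h1, by omega⟩

-- no occurrence of a marker can cross the starting position of another marker's occurrence
theorem pv_noStraddle (cs : List Char) : ∀ m ∈ pvMks, ∀ m' ∈ pvMks, ∀ p q : ℕ,
    m <+: cs.drop p → m' <+: cs.drop q → p < q → q < p + m.length → False := by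
  intro m hm m' hm' p q h1 h2 hpq hq
  obtain ⟨r, hr⟩ := h1
  have h3 : cs.drop q = m.drop (q - p) ++ r := by
    have hdd : cs.drop q = (cs.drop p).drop (q - p) := by rw [List.drop_drop]; congr 1; omega
    rw [hdd, ← hr, List.drop_append_of_le_length (by omega)]
  rw [h3] at h2
  have h6 := List.prefix_or_prefix_of_prefix h2 (List.prefix_append (m.drop (q - p)) r)
  have key : ∀ a ∈ pvMks, ∀ b ∈ pvMks, ∀ d < a.length, 0 < d →
      ¬ (b <+: a.drop d ∨ a.drop d <+: b) := by decide
  exact key m hm m' hm' (q - p) (by omega) (by omega) h6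

theorem pv_isIn_take_false (m cs : List Char) (c : Nat)
    (h : ∀ j, ¬ m <+: (cs.take c).drop j) : PySem.Chars.isIn m (cs.take c) = false := by
  cases hii : PySem.Chars.isIn m (cs.take c) with
  | false => rfl
  | true =>
    obtain ⟨j, hj⟩ := (PySem.Chars.exists_prefix_drop_iff_isIn _ _).2 hii
    exact absurd hj (h j)

theorem pv_step (cs m : List Char) (hm : m ∈ pvMks) (c : Int) (hInv : pvInv cs c) :
    pvStepA (cs.take c.toNat) m = cs.take (pvStepCut cs c m).toNat ∧ pvInv cs (pvStepCut cs c m) := by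
  have hmne : m ≠ [] := pvMks_ne_nil m hm
  have hmlen : 0 < m.length := List.length_pos_iff.2 hmne
  obtain ⟨hc0, hclen, hcor⟩ := hInv
  have hJm1 : -1 ≤ PySem.Chars.find cs m := PySem.Chars.neg_one_le_find _ _
  have hJlen : PySem.Chars.find cs m ≤ (cs.length : Int) := PySem.Chars.find_le_length _ _
  by_cases hneg : PySem.Chars.find cs m = -1
  · have hni : ¬ m <:+: cs := (PySem.Chars.find_eq_neg_one_iff _ _).1 hneg
    have hnocc : ∀ j, ¬ m <+: cs.drop j := by
      intro j hj
      exact hni ((PySem.Chars.isIn_iff_infix _ _).1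
        ((PySem.Chars.exists_prefix_drop_iff_isIn _ _).1 ⟨j, hj⟩))
    have hii : PySem.Chars.isIn m (cs.take c.toNat) = false :=
      pv_isIn_take_false m cs c.toNat
        (fun j hj => hnocc j ((pv_prefix_take_drop m cs hmne c.toNat j).1 hj).1)
    have hcut : pvStepCut cs c m = c := by simp [pvStepCut, hneg]
    rw [hcut]
    exact ⟨by simp [pvStepA, hii], hc0, hclen, hcor⟩
  · have h0J : 0 ≤ PySem.Chars.find cs m := by omega
    obtain ⟨hocc, hmin⟩ := PySem.Chars.find_spec h0J
    have hoccfit : (PySem.Chars.find cs m).toNat + m.length ≤ cs.length := by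
      have := hocc.length_le
      simp [List.length_drop] at this
      omega
    by_cases hJc : PySem.Chars.find cs m < c
    · have hcut : pvStepCut cs c m = PySem.Chars.find cs m := by simp [pvStepCut, hneg, hJc]
      have hfit : (PySem.Chars.find cs m).toNat + m.length ≤ c.toNat := by
        rcases hcor with hE | ⟨m', hm', hocc'⟩
        · omega
        · by_contra hlt
          exact pv_noStraddle cs m hm m' hm' (PySem.Chars.find cs m).toNat c.toNat hocc hocc'
            (by omega) (by omega)
      have hocc_t : m <+: (cs.take c.toNat).drop (PySem.Chars.find cs m).toNat :=
        (pv_prefix_take_drop m cs hmne c.toNat _).2 ⟨hocc, hfit⟩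
      have hii : PySem.Chars.isIn m (cs.take c.toNat) = true :=
        (PySem.Chars.exists_prefix_drop_iff_isIn _ _).1 ⟨_, hocc_t⟩
      have hmin_t : ∀ i, i < (PySem.Chars.find cs m).toNat → ¬ m <+: (cs.take c.toNat).drop i :=
        fun i hi hp => hmin i hi ((pv_prefix_take_drop m cs hmne c.toNat i).1 hp).1
      have hstep : pvStepA (cs.take c.toNat) m = cs.take (PySem.Chars.find cs m).toNat := by
        rw [pvStepA, hii]
        simp only [if_true]
        rw [pv_splitOn_headD, pv_takeFirst_at m hmne (cs.take c.toNat) _ hocc_t hmin_t,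
          List.take_take]
        congr 1
        omega
      rw [hcut]
      exact ⟨hstep, h0J, hJlen, Or.inr ⟨m, hm, hocc⟩⟩
    · have hcut : pvStepCut cs c m = c := by simp [pvStepCut, hJc]
      have hii : PySem.Chars.isIn m (cs.take c.toNat) = false := by
        apply pv_isIn_take_false
        intro j hj
        obtain ⟨hj1, hj2⟩ := (pv_prefix_take_drop m cs hmne c.toNat j).1 hj
        exact hmin j (by omega) hj1
      rw [hcut]
      exact ⟨by simp [pvStepA, hii], hc0, hclen, hcor⟩

theorem pv_fold (cs : List Char) : ∀ (ms : List (List Char)), (∀ m ∈ ms, m ∈ pvMks) →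
    ∀ (c : Int), pvInv cs c →
    ms.foldl pvStepA (cs.take c.toNat) = cs.take ((ms.foldl (pvStepCut cs) c).toNat)
      ∧ pvInv cs (ms.foldl (pvStepCut cs) c) := by
  intro ms
  induction ms with
  | nil => intro _ c hInv; exact ⟨rfl, hInv⟩
  | cons m rest ih =>
    intro hms c hInv
    obtain ⟨hstep, hInv'⟩ := pv_step cs m (hms m (by simp)) c hInv
    simp only [List.foldl_cons]
    rw [hstep]
    exact ih (fun m' hm' => hms m' (by simp [hm'])) _ hInv'

theorem pv_main (cs : List Char) :
    pvMks.foldl pvStepA cs = cs.take ((pvMks.foldl (pvStepCut cs) (cs.length : Int)).toNat)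
      ∧ pvInv cs (pvMks.foldl (pvStepCut cs) (cs.length : Int)) := by
  have hInv : pvInv cs (cs.length : Int) := ⟨by positivity, le_refl _, Or.inl rfl⟩
  have := pv_fold cs pvMks (fun m hm => hm) (cs.length : Int) hInv
  simpa using this

theorem pv_rstrip_congr (s t : String) (h : s.toList = t.toList) :
    pyRstripSlash s = pyRstripSlash t := by
  unfold pyRstripSlash
  rw [h]

theorem pv_headD_map_ofList (parts : List (List Char)) :
    ((parts.map String.ofList).headD "").toList = parts.headD [] := by
  cases parts with
  | nil => rfl
  | cons p rest => simp

theorem pv_stepStr (u sfx : String) (h : sfx.toList.isEmpty = false) :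
    (if PySem.Str.isIn sfx u then ((PySem.Str.split? u sfx).getD []).headD "" else u).toList
      = pvStepA u.toList sfx.toList := by
  rw [pvStepA]
  simp only [PySem.Str.isIn]
  by_cases hii : PySem.Chars.isIn sfx.toList u.toList = true
  · simp only [hii, if_true]
    rw [PySem.Str.split?, PySem.Chars.split?, h]
    simp only [Bool.false_eq_true, if_false, Option.map_some, Option.getD_some]
    exact pv_headD_map_ofList _
  · simp [hii]

-- A's suffix loop, moved to the char-list level
theorem pv_fold_strs (sfxs : List String) (h : ∀ s ∈ sfxs, s.toList.isEmpty = false) : ∀ (u : String),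
    (sfxs.foldl (fun u sfx => if PySem.Str.isIn sfx u then ((PySem.Str.split? u sfx).getD []).headD "" else u) u).toList
      = (sfxs.map String.toList).foldl pvStepA u.toList := by
  induction sfxs with
  | nil => intro u; rfl
  | cons s rest ih =>
    intro u
    simp only [List.foldl_cons, List.map_cons]
    rw [ih (fun x hx => h x (by simp [hx])),
      pv_stepStr u s (h s (by simp))]

-- ===== VERDICT (by name: the statement is the Claim_ definition above) =====
theorem clean_wp_url_spec : Claim_equal_clean_wp_url := by
  unfold Claim_equal_clean_wp_url Spec_clean_wp_url
  intro url _
  rw [clean_wp_url, clean_wp_url_alt]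
  by_cases h0 : url == ""
  · rw [if_pos h0, if_pos h0]
  · rw [if_neg h0, if_neg h0]
    apply pv_rstrip_congr
    have hB : ["/wp-json/wp/v2/posts", "/wp-json/wp/v2/media", "/wp-json", "/index.php", "?"].foldl
        (fun c m => let i := PySem.Str.find (PySem.Str.strip url) m; if i ≠ -1 ∧ i < c then i else c)
        (PySem.Str.len (PySem.Str.strip url))
        = pvMks.foldl (pvStepCut (PySem.Str.strip url).toList) (((PySem.Str.strip url).toList.length : Int)) := rfl
    rw [pv_stepStr _ "?" (by decide),
      pv_fold_strs ["/wp-json/wp/v2/posts", "/wp-json/wp/v2/media", "/wp-json", "/index.php"]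
        (by decide) (PySem.Str.strip url), hB]
    have hM : pvMks = (["/wp-json/wp/v2/posts", "/wp-json/wp/v2/media", "/wp-json",
        "/index.php"].map String.toList) ++ ["?".toList] := rfl
    obtain ⟨hmain, hc0, -, -⟩ := pv_main (PySem.Str.strip url).toList
    rw [hM, List.foldl_append, List.foldl_cons, List.foldl_nil] at hmain
    rw [hM, List.foldl_append, List.foldl_cons, List.foldl_nil] at hc0 ⊢
    rw [hmain]
    simp only [show ("?".toList) = ['?'] from rfl] at hc0
    rw [PySem.Str.slice, String.toList_ofList, PySem.Chars.slice_eq_listSlice,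
      PySem.List.slice_to _ hc0]
    simp only [String.toList_ofList, List.foldl_append, List.foldl_cons, List.foldl_nil]
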